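-- pv_equiv track=rewrite | github.com/praxiseng/flowslicer | db.py | convert_to_counts
-- ===== SOURCE A (Python) =====
-- import itertools
--
-- def convert_to_counts(entries):
--     entry_groups = []
--     for k, g in itertools.groupby(entries, lambda x: x[0]):
--         entry_groups.append(list(g))
--
--     counts = []
--     for group in entry_groups:
--         slice_hash = group[0][0]
--
--         funcs = set()
--         instance_counts = len(group)
--         func_counts = len(set(func_id for h, fid, func_id in group))
--         fids = set(fid for h, fid, func_id in group)
--         file_counts = len(fids)
--         file_list = sorted(fids)
--
--         count_entry = [slice_hash, file_counts, func_counts, instance_counts, sorted(fids)]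
--         counts.append(count_entry)
--
--     return counts
-- ===== SOURCE B (Python) =====
-- def convert_to_counts(entries):
--     counts = []
--     cur_hash = None
--     fids = set()
--     funcs = set()
--     n = 0
--     for h, fid, func_id in entries:
--         if n > 0 and h != cur_hash:
--             counts.append([cur_hash, len(fids), len(funcs), n, sorted(fids)])
--             fids = set()
--             funcs = set()
--             n = 0
--         cur_hash = h
--         fids.add(fid)
--         funcs.add(func_id)
--         n += 1
--     if n > 0:
--         counts.append([cur_hash, len(fids), len(funcs), n, sorted(fids)])
--     return counts
-- ===== Notes on version B (the rewrite author's own statement) =====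
-- stated objective: alternative
-- what changed: Replaces groupby-then-reprocess (materialising every group list and scanning each group again for the two sets and the length) with a single streaming pass that maintains the current hash, the two sets and an instance counter, flushing on each consecutive-key change.
import Mathlib
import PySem

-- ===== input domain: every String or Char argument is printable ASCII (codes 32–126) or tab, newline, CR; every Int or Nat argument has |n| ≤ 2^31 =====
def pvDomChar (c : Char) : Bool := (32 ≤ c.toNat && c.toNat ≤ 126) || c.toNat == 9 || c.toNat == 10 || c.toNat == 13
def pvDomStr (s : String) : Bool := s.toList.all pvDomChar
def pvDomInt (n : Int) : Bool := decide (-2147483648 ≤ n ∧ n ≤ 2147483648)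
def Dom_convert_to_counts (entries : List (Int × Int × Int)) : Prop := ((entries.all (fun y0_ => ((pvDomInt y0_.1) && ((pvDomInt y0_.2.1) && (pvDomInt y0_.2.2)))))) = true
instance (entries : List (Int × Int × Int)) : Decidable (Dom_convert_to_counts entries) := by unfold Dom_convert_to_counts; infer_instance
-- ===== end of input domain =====

-- B replaces A's groupby-then-reprocess (group lists materialised, each group scanned
-- again for its sets and length) with one streaming pass keeping the current hash, two
-- sets and an instance counter, flushed on each consecutive-key change.

-- ===== PORT A =====
-- itertools.groupby(entries, lambda x: x[0]) with each group materialised as a list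
def pvGroupby : List (Int × Int × Int) → List (List (Int × Int × Int))
  | [] => []
  | x :: xs =>
    (x :: xs.takeWhile (fun y => y.1 == x.1)) :: pvGroupby (xs.dropWhile (fun y => y.1 == x.1))
termination_by l => l.length
decreasing_by
  exact Nat.lt_succ_of_le (List.length_dropWhile_le _ _)

-- the body of A's second loop; group[0][0] is safe (groupby groups are nonempty), ported via headD
def pvCountEntry (group : List (Int × Int × Int)) : Int × Int × Int × Int × List Int :=
  let slice_hash := (group.headD (0, 0, 0)).1
  let instance_counts : Int := group.length
  let func_counts : Int := PySem.Set.len (PySem.Set.ofList (group.map (fun e => e.2.2)))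
  let fids : PySem.Set Int := PySem.Set.ofList (group.map (fun e => e.2.1))
  let file_counts : Int := PySem.Set.len fids
  (slice_hash, file_counts, func_counts, instance_counts, PySem.List.sorted fids (fun x => x) false)

def convert_to_counts (entries : List (Int × Int × Int)) : List (Int × Int × Int × Int × List Int) :=
  (pvGroupby entries).map pvCountEntry

-- ===== PORT B =====
-- the flush 'counts.append([cur_hash, len(fids), len(funcs), n, sorted(fids)])'
def pvFlush (h : Int) (fids funcs : PySem.Set Int) (n : Int) : Int × Int × Int × Int × List Int :=
  (h, PySem.Set.len fids, PySem.Set.len funcs, n, PySem.List.sorted fids (fun x => x) false)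

-- B's streaming loop state: current hash, fid set, func set, instance counter
def pvLoop (h : Int) (fids funcs : PySem.Set Int) (n : Int) :
    List (Int × Int × Int) → List (Int × Int × Int × Int × List Int)
  | [] => [pvFlush h fids funcs n]
  | (h', fid, func) :: rest =>
    if h' == h then
      pvLoop h (PySem.Set.add fids fid) (PySem.Set.add funcs func) (n + 1) rest
    else
      pvFlush h fids funcs n ::
        pvLoop h' (PySem.Set.add PySem.Set.empty fid) (PySem.Set.add PySem.Set.empty func) 1 rest

def convert_to_counts_alt (entries : List (Int × Int × Int)) : List (Int × Int × Int × Int × List Int) :=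
  match entries with
  | [] => []
  | (h, fid, func) :: rest =>
    pvLoop h (PySem.Set.add PySem.Set.empty fid) (PySem.Set.add PySem.Set.empty func) 1 rest

-- ===== PRECONDITION & SPEC =====
def Spec_convert_to_counts (entries : List (Int × Int × Int)) (out : List (Int × Int × Int × Int × List Int)) : Prop := out = convert_to_counts_alt entries
instance (entries : List (Int × Int × Int)) (out : List (Int × Int × Int × Int × List Int)) : Decidable (Spec_convert_to_counts entries out) := by unfold Spec_convert_to_counts; infer_instance

-- ===== CLAIM (what is proved, stated in full; the proofs are below) =====
def Claim_equal_convert_to_counts : Prop := ∀ (entries : List (Int × Int × Int)), Dom_convert_to_counts entries → Spec_convert_to_counts entries (convert_to_counts entries)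

-- ===== LEMMAS AND PROOFS =====

theorem pv_takeWhile_app (pred : (Int × Int × Int) → Bool) (p rest : List (Int × Int × Int))
    (hp : ∀ e ∈ p, pred e = true) :
    (p ++ rest).takeWhile pred = p ++ rest.takeWhile pred := by
  induction p with
  | nil => simp
  | cons x xs ih =>
    simp [hp x (by simp), ih (fun e he => hp e (by simp [he]))]

theorem pv_dropWhile_app (pred : (Int × Int × Int) → Bool) (p rest : List (Int × Int × Int))
    (hp : ∀ e ∈ p, pred e = true) :
    (p ++ rest).dropWhile pred = rest.dropWhile pred := by
  induction p with
  | nil => simp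
  | cons x xs ih =>
    simp [hp x (by simp), ih (fun e he => hp e (by simp [he]))]

-- a nonempty constant-key prefix is absorbed into the first groupby group
theorem pv_groupby_prefix (p : List (Int × Int × Int)) (h : Int) (rest : List (Int × Int × Int))
    (hne : p ≠ []) (hall : ∀ e ∈ p, e.1 = h) :
    pvGroupby (p ++ rest)
      = (p ++ rest.takeWhile (fun y => y.1 == h)) :: pvGroupby (rest.dropWhile (fun y => y.1 == h)) := by
  match p with
  | [] => exact absurd rfl hne
  | x :: p' =>
    have hx : x.1 = h := hall x (by simp)
    subst hx
    have hp' : ∀ e ∈ p', (fun y => y.1 == x.1) e = true := by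
      intro e he; simp [hall e (by simp [he])]
    rw [List.cons_append, pvGroupby,
        pv_takeWhile_app _ p' rest hp', pv_dropWhile_app _ p' rest hp']
    simp

theorem pv_flush_eq (p : List (Int × Int × Int)) (h : Int)
    (hne : p ≠ []) (hall : ∀ e ∈ p, e.1 = h) :
    pvCountEntry p
      = pvFlush h (PySem.Set.ofList (p.map (fun e => e.2.1)))
          (PySem.Set.ofList (p.map (fun e => e.2.2))) (p.length : Int) := by
  match p with
  | [] => exact absurd rfl hne
  | x :: p' =>
    have hx : x.1 = h := hall x (by simp)
    simp [pvCountEntry, pvFlush, hx]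

theorem pv_ofList_append_one (l : List Int) (x : Int) :
    PySem.Set.ofList (l ++ [x]) = PySem.Set.add (PySem.Set.ofList l) x := by
  rw [PySem.Set.ofList_eq_foldl, PySem.Set.ofList_eq_foldl, List.foldl_append]
  rfl

theorem pv_loop_eq (rest : List (Int × Int × Int)) :
    ∀ (p : List (Int × Int × Int)) (h : Int), p ≠ [] → (∀ e ∈ p, e.1 = h) →
      pvLoop h (PySem.Set.ofList (p.map (fun e => e.2.1)))
        (PySem.Set.ofList (p.map (fun e => e.2.2))) (p.length : Int) rest
      = (pvGroupby (p ++ rest)).map pvCountEntry := by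
  induction rest with
  | nil =>
    intro p h hne hall
    rw [List.append_nil, pvLoop]
    have := pv_groupby_prefix p h [] hne hall
    simp only [List.takeWhile_nil, List.dropWhile_nil, List.append_nil] at this
    rw [this, pvGroupby]
    simp [pv_flush_eq p h hne hall]
  | cons e rest' ih =>
    intro p h hne hall
    obtain ⟨h', fid, func⟩ := e
    by_cases hcase : h' = h
    · subst hcase
      rw [pvLoop]
      simp only [BEq.rfl, if_true]
      have h1 := ih (p ++ [(h', fid, func)]) h' (by simp)
        (by intro e he; rcases List.mem_append.mp he with h2 | h2
            · exact hall e h2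
            · simp at h2; simp [h2])
      simp only [List.map_append, List.length_append, List.append_assoc, List.cons_append,
        List.nil_append, List.map_cons, List.map_nil] at h1
      rw [pv_ofList_append_one, pv_ofList_append_one] at h1
      rw [← h1]
      congr 1
    · rw [pvLoop]
      have hbeq : (h' == h) = false := by simp [hcase]
      rw [hbeq]
      simp only [Bool.false_eq_true, if_false]
      have h1 := ih [(h', fid, func)] h' (by simp) (by simp)
      simp only [List.map_cons, List.map_nil, List.length_cons, List.length_nil,
        List.singleton_append] at h1
      norm_num at h1
      have hof : PySem.Set.ofList ([fid]) = PySem.Set.add PySem.Set.empty fid := rfl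
      have hof2 : PySem.Set.ofList ([func]) = PySem.Set.add PySem.Set.empty func := rfl
      rw [hof, hof2] at h1
      rw [h1, pv_groupby_prefix p h ((h', fid, func) :: rest') hne hall]
      have htw : ((h', fid, func) :: rest').takeWhile (fun y => y.1 == h) = [] := by
        simp [hcase]
      have hdw : ((h', fid, func) :: rest').dropWhile (fun y => y.1 == h)
          = (h', fid, func) :: rest' := by
        simp [hcase]
      rw [htw, hdw, List.append_nil, List.map_cons, pv_flush_eq p h hne hall]

-- ===== VERDICT (by name: the statement is the Claim_ definition above) =====
theorem convert_to_counts_spec : Claim_equal_convert_to_counts := by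
  intro entries _
  unfold Spec_convert_to_counts
  match entries with
  | [] => simp [convert_to_counts, convert_to_counts_alt, pvGroupby]
  | (h, fid, func) :: rest =>
    rw [convert_to_counts_alt]
    have h1 := pv_loop_eq rest [(h, fid, func)] h (by simp) (by simp)
    simp only [List.map_cons, List.map_nil, List.length_cons, List.length_nil,
      List.singleton_append] at h1
    norm_num at h1
    have hof : PySem.Set.ofList ([fid]) = PySem.Set.add PySem.Set.empty fid := rfl
    have hof2 : PySem.Set.ofList ([func]) = PySem.Set.add PySem.Set.empty func := rfl
    rw [hof, hof2] at h1
    rw [h1]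
    rfl
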